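-- pv_equiv track=rewrite | github.com/dmwm/WMCore | src/python/WMComponent/WorkflowUpdater/WorkflowUpdaterPoller.py | checkChanges
-- ===== SOURCE A (Python) =====
-- def checkChanges(jdict, msPUBlockLoc):
--     """
--     Compare if provided json block locations are different from block locations presented
--     in pileup configuration JSON file.
--
--     :param jdict: block structure from pileupconf.json file, e.g. {'block': [rses], ...}
--     :param msPUBlockLoc: block location dict obtained MSPileup service, e.g. {'block': [rses], ....}
--     :return: boolean (i.e. if there are changes or not)
--     """
--     if sorted(jdict.keys()) != sorted(msPUBlockLoc.keys()):
--         return True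
--     for block, msRSEs in msPUBlockLoc.items():
--         if block in jdict:
--             # first use-case: check for RSE match
--             jsonRSEs = jdict[block]
--             if sorted(msRSEs) != sorted(jsonRSEs):
--                 return True
--         else:
--             # second use-case: MSPileup has a block which is not in configuration json
--             return True
--     return False
-- ===== SOURCE B (Python) =====
-- def checkChanges(jdict, msPUBlockLoc):
--     # different algorithm: no sorting; key-set test plus a multiset count of
--     # flattened (block, rse) pairs: add for jdict, subtract (with early exit
--     # on underflow) for msPUBlockLoc, then check all counts returned to zero.
--     if set(jdict) != set(msPUBlockLoc):
--         return True
--     counts = {}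
--     for block, rses in jdict.items():
--         for rse in rses:
--             counts[(block, rse)] = counts.get((block, rse), 0) + 1
--     for block, rses in msPUBlockLoc.items():
--         for rse in rses:
--             pair = (block, rse)
--             left = counts.get(pair, 0)
--             if left == 0:
--                 return True
--             counts[pair] = left - 1
--     return any(c != 0 for c in counts.values())
-- ===== Notes on version B (the rewrite author's own statement) =====
-- stated objective: alternative
-- what changed: Replaces A's sort-based comparison (sorted key lists, then per-block sorted-RSE-list equality with early returns) by a sort-free counting algorithm: key-set equality plus a multiset comparison of flattened (block, rse) pairs via one increment pass and one decrement pass with underflow detection.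
import Mathlib
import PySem

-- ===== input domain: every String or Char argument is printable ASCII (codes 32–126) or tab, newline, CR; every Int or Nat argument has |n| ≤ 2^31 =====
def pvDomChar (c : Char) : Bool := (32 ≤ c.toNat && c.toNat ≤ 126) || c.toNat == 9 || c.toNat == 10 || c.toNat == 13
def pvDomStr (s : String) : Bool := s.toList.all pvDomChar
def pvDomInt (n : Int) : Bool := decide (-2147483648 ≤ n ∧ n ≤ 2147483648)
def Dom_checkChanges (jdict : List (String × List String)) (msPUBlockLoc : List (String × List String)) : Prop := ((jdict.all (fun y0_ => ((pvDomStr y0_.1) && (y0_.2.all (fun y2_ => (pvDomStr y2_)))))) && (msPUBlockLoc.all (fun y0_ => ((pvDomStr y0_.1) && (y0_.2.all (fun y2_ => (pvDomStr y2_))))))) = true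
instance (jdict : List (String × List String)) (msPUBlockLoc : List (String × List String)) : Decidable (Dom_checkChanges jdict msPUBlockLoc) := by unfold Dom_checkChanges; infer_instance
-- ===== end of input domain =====

-- B replaces A's sort-based comparison by a sort-free counting algorithm over flattened (block, rse) pairs (alternative decomposition, no speed claim).

-- ===== PORT A =====
-- the for-loop over msPUBlockLoc.items() with its early returns
def checkChangesLoopA (j : PySem.Dict String (List String)) :
    List (String × List String) → Bool
  | [] => false
  | (block, msRSEs) :: rest =>
      if j.contains block then
        -- jsonRSEs = jdict[block]; 'if sorted(msRSEs) != sorted(jsonRSEs): return True'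
        if PySem.List.sorted msRSEs (fun x => x) false ≠
           PySem.List.sorted (j.getD block []) (fun x => x) false then true
        else checkChangesLoopA j rest
      else true

def checkChanges (jdict : List (String × List String)) (msPUBlockLoc : List (String × List String)) : Bool :=
  let j := PySem.Dict.ofList jdict
  let m := PySem.Dict.ofList msPUBlockLoc
  if PySem.List.sorted j.keys (fun x => x) false ≠
     PySem.List.sorted m.keys (fun x => x) false then true
  else checkChangesLoopA j m.items

-- ===== PORT B =====
-- inner loop of the increment pass: 'for rse in rses: counts[(block, rse)] = counts.get((block, rse), 0) + 1'
def countUpB (block : String) (counts : PySem.Dict (String × String) Int) (rses : List String) :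
    PySem.Dict (String × String) Int :=
  rses.foldl (fun d rse => d.insert (block, rse) (d.getD (block, rse) 0 + 1)) counts

-- inner loop of the decrement pass; none = the early 'return True' on underflow
def countDownB (block : String) (counts : PySem.Dict (String × String) Int) :
    List String → Option (PySem.Dict (String × String) Int)
  | [] => some counts
  | rse :: rest =>
      let left := counts.getD (block, rse) 0
      if left == 0 then none
      else countDownB block (counts.insert (block, rse) (left - 1)) rest

-- outer loop of the decrement pass over msPUBlockLoc.items()
def downLoopB (counts : PySem.Dict (String × String) Int) :
    List (String × List String) → Option (PySem.Dict (String × String) Int)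
  | [] => some counts
  | (block, rses) :: rest =>
      match countDownB block counts rses with
      | none => none
      | some d => downLoopB d rest

def checkChanges_alt (jdict : List (String × List String)) (msPUBlockLoc : List (String × List String)) : Bool :=
  let j := PySem.Dict.ofList jdict
  let m := PySem.Dict.ofList msPUBlockLoc
  -- 'if set(jdict) != set(msPUBlockLoc): return True'
  if !(PySem.Set.equal (PySem.Set.ofList j.keys) (PySem.Set.ofList m.keys)) then true
  else
    let counts := j.items.foldl (fun d p => countUpB p.1 d p.2) PySem.Dict.empty
    match downLoopB counts m.items with
    | none => true
    | some final => final.values.any (fun c => decide (c ≠ 0))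

-- ===== PRECONDITION & SPEC =====
def Spec_checkChanges (jdict : List (String × List String)) (msPUBlockLoc : List (String × List String)) (out : Bool) : Prop := out = checkChanges_alt jdict msPUBlockLoc
instance (jdict : List (String × List String)) (msPUBlockLoc : List (String × List String)) (out : Bool) : Decidable (Spec_checkChanges jdict msPUBlockLoc out) := by unfold Spec_checkChanges; infer_instance

-- ===== CLAIM (what is proved, stated in full; the proofs are below) =====
def Claim_equal_checkChanges : Prop := ∀ (jdict : List (String × List String)) (msPUBlockLoc : List (String × List String)), Dom_checkChanges jdict msPUBlockLoc → Spec_checkChanges jdict msPUBlockLoc (checkChanges jdict msPUBlockLoc)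

-- ===== LEMMAS AND PROOFS =====

-- the flattened (block, rse) pair list of an items list
def pairsOf (l : List (String × List String)) : List (String × String) :=
  l.flatMap (fun p => p.2.map (fun r => (p.1, r)))

-- a single abstract decrement loop over a flat pair list
def pairLoop (counts : PySem.Dict (String × String) Int) :
    List (String × String) → Option (PySem.Dict (String × String) Int)
  | [] => some counts
  | q :: qs =>
      let left := counts.getD q 0
      if left == 0 then none
      else pairLoop (counts.insert q (left - 1)) qs

-- A's loop returns false iff every block of the list is in j with the same sorted RSE list
theorem loopA_eq_false_iff (j : PySem.Dict String (List String)) (l : List (String × List String)) :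
    checkChangesLoopA j l = false ↔
      ∀ p ∈ l, j.contains p.1 = true ∧
        PySem.List.sorted p.2 (fun x => x) false =
          PySem.List.sorted (j.getD p.1 []) (fun x => x) false := by
  induction l with
  | nil => simp [checkChangesLoopA]
  | cons hd tl ih =>
      obtain ⟨b, v⟩ := hd
      simp only [checkChangesLoopA]
      by_cases hc : j.contains b = true
      · by_cases hs : PySem.List.sorted v (fun x => x) false =
            PySem.List.sorted (j.getD b []) (fun x => x) false
        · simp [hc, hs, ih]
        · simp [hc, hs]
      · simp [hc]

-- the nested increment pass is the flat increment pass over pairsOf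
theorem up_flat (l : List (String × List String)) (d : PySem.Dict (String × String) Int) :
    l.foldl (fun d p => countUpB p.1 d p.2) d =
      (pairsOf l).foldl (fun d q => d.insert q (d.getD q 0 + 1)) d := by
  induction l generalizing d with
  | nil => simp [pairsOf]
  | cons hd tl ih =>
      simp only [pairsOf, List.flatMap_cons, List.foldl_append, List.foldl_cons]
      rw [ih]
      congr 1
      simp [countUpB, List.foldl_map]

-- the inner decrement loop is the flat loop over this block's pairs
theorem down_inner_flat (b : String) (rs : List String) (d : PySem.Dict (String × String) Int) :
    countDownB b d rs = pairLoop d (rs.map (fun r => (b, r))) := by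
  induction rs generalizing d with
  | nil => simp [countDownB, pairLoop]
  | cons r rest ih =>
      simp only [countDownB, pairLoop, List.map_cons]
      split
      · rfl
      · exact ih _

-- the nested decrement pass is the flat loop over pairsOf
theorem down_flat (l : List (String × List String)) (d : PySem.Dict (String × String) Int) :
    downLoopB d l = pairLoop d (pairsOf l) := by
  induction l generalizing d with
  | nil => simp [downLoopB, pairsOf, pairLoop]
  | cons hd tl ih =>
      obtain ⟨b, v⟩ := hd
      simp only [downLoopB, pairsOf, List.flatMap_cons, down_inner_flat]
      have : ∀ (qs qs' : List (String × String)) (d : PySem.Dict (String × String) Int),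
          (match pairLoop d qs with
           | none => none
           | some d' => pairLoop d' qs') = pairLoop d (qs ++ qs') := by
        intro qs
        induction qs with
        | nil => intro qs' d; simp [pairLoop]
        | cons q rest ih2 =>
            intro qs' d
            by_cases h : (d.getD q 0 == 0) = true
            · simp [pairLoop, h]
            · simp only [pairLoop, List.cons_append, if_neg h]
              exact ih2 _ _
      rw [← this]
      cases pairLoop d (v.map (fun r => (b, r))) with
      | none => rfl
      | some d' => exact ih d'

-- the decrement pass followed by the all-zero test, as one Bool
def finB (d : PySem.Dict (String × String) Int) (qs : List (String × String)) : Bool :=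
  match pairLoop d qs with
  | none => true
  | some f => f.values.any (fun c => decide (c ≠ 0))

-- 'any(c != 0)' over a dict with Nodup keys is a statement about every getD
theorem values_any_ne_zero_iff (d : PySem.Dict (String × String) Int) (hnd : d.keys.Nodup) :
    (d.values.any (fun c => decide (c ≠ 0)) = false) ↔ ∀ q, d.getD q 0 = 0 := by
  rw [PySem.Dict.values_eq_map_keys d hnd 0, List.any_eq_false]
  constructor
  · intro h q
    by_cases hq : q ∈ d.keys
    · have := h _ (List.mem_map.mpr ⟨q, hq, rfl⟩)
      simpa using this
    · exact PySem.Dict.getD_of_not_contains _ 0 (by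
        simpa [PySem.Dict.contains_eq_decide_mem_keys] using hq)
  · intro h c hc
    obtain ⟨q, _, rfl⟩ := List.mem_map.mp hc
    simp [h q]

-- heart of B's correctness: the decrement pass from a nonnegative counter ends all-zero
-- exactly when the counter equals the pair counts of the consumed list
theorem finB_eq_false_iff (qs : List (String × String)) :
    ∀ (d : PySem.Dict (String × String) Int), d.keys.Nodup → (∀ q, 0 ≤ d.getD q 0) →
      (finB d qs = false ↔ ∀ q, d.getD q 0 = (qs.count q : Int)) := by
  induction qs with
  | nil =>
      intro d hnd _
      simpa [finB, pairLoop] using values_any_ne_zero_iff d hnd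
  | cons q qs ih =>
      intro d hnd hpos
      by_cases hz : d.getD q 0 = 0
      · constructor
        · intro h
          exfalso
          simp [finB, pairLoop, hz] at h
        · intro h
          have := h q
          simp [hz, List.count_cons_self] at this
          omega
      · have hstep : finB d (q :: qs) = finB (d.insert q (d.getD q 0 - 1)) qs := by
          simp [finB, pairLoop, hz]
        rw [hstep, ih _ (PySem.Dict.nodup_keys_insert _ _ _ hnd) ?pos]
        case pos =>
          intro p
          rw [PySem.Dict.getD_insert]
          split
          · have := hpos q; omega
          · exact hpos p
        constructor
        · intro h p
          have hp := h p
          rw [PySem.Dict.getD_insert] at hp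
          by_cases hpq : p = q
          · subst hpq
            rw [List.count_cons_self]
            simp at hp
            push_cast
            omega
          · rw [List.count_cons_of_ne (fun h => hpq h.symm)]
            simpa [hpq] using hp
        · intro h p
          rw [PySem.Dict.getD_insert]
          by_cases hpq : p = q
          · subst hpq
            have := h p
            rw [List.count_cons_self] at this
            rw [if_pos rfl]
            push_cast at this ⊢
            omega
          · rw [if_neg hpq]
            have := h p
            rwa [List.count_cons_of_ne (fun h => hpq h.symm)] at this

-- a pair (b, r) occurs in pairsOf l only under a key b of l
theorem mem_pairs_imp (l : List (String × List String)) (b r : String) :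
    (b, r) ∈ pairsOf l → b ∈ l.map Prod.fst := by
  intro h
  obtain ⟨p, hp, hm⟩ := List.mem_flatMap.mp h
  obtain ⟨r', _, heq⟩ := List.mem_map.mp hm
  obtain ⟨h1, _⟩ := Prod.mk.injEq .. ▸ heq
  exact List.mem_map.mpr ⟨p, hp, h1⟩

theorem pairs_count_of_not_mem (l : List (String × List String)) (b r : String)
    (hb : b ∉ l.map Prod.fst) : (pairsOf l).count (b, r) = 0 :=
  List.count_eq_zero.mpr (fun h => hb (mem_pairs_imp l b r h))

-- count of (b, r) in one block's flattened pairs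
theorem count_block_pairs (b b' r : String) (v : List String) :
    (v.map (fun r' => (b', r'))).count (b, r) = if b' = b then v.count r else 0 := by
  split
  · subst ‹b' = b›
    exact List.count_map_of_injective v _ (fun x y h => by simpa using h) r
  · exact List.count_eq_zero.mpr (fun h => by
      obtain ⟨r', _, heq⟩ := List.mem_map.mp h
      exact ‹¬ b' = b› (by simpa using congrArg Prod.fst heq))

theorem pairs_count_of_mem (l : List (String × List String)) (b r : String) (v : List String)
    (hnd : (l.map Prod.fst).Nodup) (hm : (b, v) ∈ l) :
    (pairsOf l).count (b, r) = v.count r := by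
  induction l with
  | nil => cases hm
  | cons hd tl ih =>
      obtain ⟨b', v'⟩ := hd
      simp only [List.map_cons, List.nodup_cons] at hnd
      simp only [pairsOf, List.flatMap_cons, List.count_append]
      rcases List.mem_cons.mp hm with heq | htl
      · obtain ⟨rfl, rfl⟩ := Prod.mk.injEq .. ▸ heq
        have h0 := pairs_count_of_not_mem tl b r hnd.1
        simp only [pairsOf] at h0
        rw [count_block_pairs, if_pos rfl]
        omega
      · have hbne : b' ≠ b := fun h => hnd.1 (h ▸ List.mem_map.mpr ⟨_, htl, rfl⟩)
        have hih := ih hnd.2 htl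
        simp only [pairsOf] at hih
        rw [count_block_pairs, if_neg hbne]
        omega

-- for a dict with Nodup keys, pair counts are per-block RSE counts
theorem pairs_count_dict (d : PySem.Dict String (List String)) (hnd : d.keys.Nodup) (b r : String) :
    (pairsOf d.items).count (b, r) = (d.getD b []).count r := by
  by_cases hb : b ∈ d.keys
  · obtain ⟨v, hv⟩ : ∃ v, (b, v) ∈ d.items := by simpa [PySem.Dict.keys] using hb
    rw [pairs_count_of_mem d.items b r v (by simpa [PySem.Dict.keys] using hnd) hv,
      PySem.Dict.getD_of_mem_items _ hv hnd]
  · rw [pairs_count_of_not_mem d.items b r (by simpa [PySem.Dict.keys] using hb),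
      PySem.Dict.getD_of_not_contains _ [] (by simpa [PySem.Dict.contains_eq_decide_mem_keys] using hb)]
    simp

-- ===== VERDICT (by name: the statement is the Claim_ definition above) =====
theorem checkChanges_spec : Claim_equal_checkChanges := by
  intro jdict msPUBlockLoc _
  unfold Spec_checkChanges
  set j := PySem.Dict.ofList jdict with hj
  set m := PySem.Dict.ofList msPUBlockLoc with hm
  have hjn : j.keys.Nodup := PySem.Dict.nodup_keys_ofList jdict
  have hmn : m.keys.Nodup := PySem.Dict.nodup_keys_ofList msPUBlockLoc
  -- both key tests say exactly 'j.keys is a permutation of m.keys'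
  have hkeysA : (PySem.List.sorted j.keys (fun x => x) false =
      PySem.List.sorted m.keys (fun x => x) false) ↔ j.keys.Perm m.keys :=
    PySem.List.sorted_id_eq_sorted_id_iff_perm _ _
  have hkeysB : (PySem.Set.equal (PySem.Set.ofList j.keys) (PySem.Set.ofList m.keys) = true) ↔
      j.keys.Perm m.keys := by
    rw [PySem.Set.ofList_eq_self_of_nodup _ hjn, PySem.Set.ofList_eq_self_of_nodup _ hmn,
      PySem.Set.equal_iff, ← List.perm_ext_iff_of_nodup hjn hmn]
  -- the counter built by the increment pass
  set counts := j.items.foldl (fun d p => countUpB p.1 d p.2) PySem.Dict.empty with hcounts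
  have hcget : ∀ q, counts.getD q 0 = ((pairsOf j.items).count q : Int) := by
    intro q
    rw [hcounts, up_flat]
    simpa using PySem.Dict.getD_foldl_insert_add_one (pairsOf j.items) PySem.Dict.empty q
  have hcnd : counts.keys.Nodup := by
    rw [hcounts, up_flat]
    exact PySem.Dict.nodup_keys_foldl_insert _ _ _ PySem.Dict.nodup_keys_empty
  have hcpos : ∀ q, 0 ≤ counts.getD q 0 := by
    intro q; rw [hcget]; positivity
  -- B = false ↔ keys perm ∧ equal pair counts
  have hB : checkChanges_alt jdict msPUBlockLoc = false ↔
      (j.keys.Perm m.keys ∧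
        ∀ q, (pairsOf j.items).count q = (pairsOf m.items).count q) := by
    by_cases hk : PySem.Set.equal (PySem.Set.ofList j.keys) (PySem.Set.ofList m.keys) = true
    · have hfin : (finB counts (pairsOf m.items) = false) ↔
          ∀ q, counts.getD q 0 = ((pairsOf m.items).count q : Int) :=
        finB_eq_false_iff (pairsOf m.items) counts hcnd hcpos
      have : checkChanges_alt jdict msPUBlockLoc = finB counts (pairsOf m.items) := by
        simp only [checkChanges_alt, ← hj, ← hm, hk, Bool.not_true, ← hcounts,
          finB, down_flat]
        rfl
      rw [this, hfin]
      constructor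
      · intro h
        refine ⟨hkeysB.mp hk, fun q => ?_⟩
        have := (hcget q).symm.trans (h q)
        exact_mod_cast this
      · intro ⟨_, h⟩ q
        rw [hcget]
        exact_mod_cast h q
    · simp only [checkChanges_alt, ← hj, ← hm, hk, Bool.not_false]
      simp only [Bool.not_eq_true] at hk
      constructor
      · intro h; simp at h
      · intro ⟨hp, _⟩; exact absurd (hkeysB.mpr hp) (by simp [hk])
  -- A = false ↔ keys perm ∧ per-block sorted equality
  have hA : checkChanges jdict msPUBlockLoc = false ↔
      (j.keys.Perm m.keys ∧
        ∀ p ∈ m.items, j.contains p.1 = true ∧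
          PySem.List.sorted p.2 (fun x => x) false =
            PySem.List.sorted (j.getD p.1 []) (fun x => x) false) := by
    by_cases h : PySem.List.sorted j.keys (fun x => x) false =
        PySem.List.sorted m.keys (fun x => x) false
    · rw [show checkChanges jdict msPUBlockLoc = checkChangesLoopA j m.items by
        simp [checkChanges, ← hj, ← hm, h]]
      rw [loopA_eq_false_iff]
      exact ⟨fun ha => ⟨hkeysA.mp h, ha⟩, And.right⟩
    · constructor
      · intro hc; exfalso; revert hc; simp [checkChanges, ← hj, ← hm, h]
      · intro ⟨hp, _⟩; exact absurd (hkeysA.mpr hp) h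
  -- the two right-hand sides agree
  have hmain : (j.keys.Perm m.keys ∧
        ∀ p ∈ m.items, j.contains p.1 = true ∧
          PySem.List.sorted p.2 (fun x => x) false =
            PySem.List.sorted (j.getD p.1 []) (fun x => x) false) ↔
      (j.keys.Perm m.keys ∧
        ∀ q, (pairsOf j.items).count q = (pairsOf m.items).count q) := by
    constructor
    · rintro ⟨hperm, hall⟩
      refine ⟨hperm, fun ⟨b, r⟩ => ?_⟩
      rw [pairs_count_dict j hjn, pairs_count_dict m hmn]
      by_cases hb : b ∈ m.keys
      · obtain ⟨v, hv⟩ : ∃ v, (b, v) ∈ m.items := by simpa [PySem.Dict.keys] using hb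
        obtain ⟨_, hs⟩ := hall (b, v) hv
        rw [PySem.Dict.getD_of_mem_items _ hv hmn]
        have hperm2 : v.Perm (j.getD b []) :=
          (PySem.List.sorted_id_eq_sorted_id_iff_perm _ _).mp hs
        exact (hperm2.count_eq r).symm
      · have hbj : b ∉ j.keys := fun h => hb (hperm.mem_iff.mp h)
        rw [PySem.Dict.getD_of_not_contains _ []
            (by simpa [PySem.Dict.contains_eq_decide_mem_keys] using hbj),
          PySem.Dict.getD_of_not_contains _ []
            (by simpa [PySem.Dict.contains_eq_decide_mem_keys] using hb)]
    · rintro ⟨hperm, hall⟩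
      refine ⟨hperm, fun ⟨b, v⟩ hv => ?_⟩
      have hb : b ∈ j.keys := hperm.mem_iff.mpr (PySem.Dict.mem_keys_of_mem_items _ hv)
      refine ⟨(PySem.Dict.contains_iff_mem_keys _ b).mpr hb, ?_⟩
      apply (PySem.List.sorted_id_eq_sorted_id_iff_perm _ _).mpr
      apply List.perm_iff_count.mpr
      intro r
      have := hall (b, r)
      rw [pairs_count_dict j hjn, pairs_count_dict m hmn,
        PySem.Dict.getD_of_mem_items _ hv hmn] at this
      exact this.symm
  have := hA.trans (hmain.trans hB.symm)
  cases ha : checkChanges jdict msPUBlockLoc <;>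
    cases hb : checkChanges_alt jdict msPUBlockLoc <;> simp_all
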